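-- pv_equiv track=rewrite | github.com/SMAT-Lab/ArkAnalyzer-HapRay | perf_testing/hapray/core/gui_agent/batch_runner.py | categorize_bundle
-- ===== SOURCE A (Python) =====
-- def categorize_bundle(app_package: str) -> str:
--     b = app_package.lower()
--     if any(
--         k in b
--         for k in (
--             'taobao',
--             'tmall',
--             'jd.',
--             'pinduoduo',
--             'vip',
--             'dewu',
--             'idlefish',
--             'zhuanzhuan',
--             'hippo',
--             'ddmc',
--             'samsclub',
--             'damai',
--             'cainiao',
--         )
--     ):
--         return 'ecommerce'
--     if any(k in b for k in ('alipay', 'bank', 'icbc', 'ccb', 'cmb', 'psbc', 'pingan')):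
--         return 'finance'
--     if any(k in b for k in ('meituan', 'dianping', 'eleme', 'wuba', 'beike', 'anjuke', 'luckin', 'kfc', 'charge')):
--         return 'life'
--     if any(
--         k in b
--         for k in (
--             'amap',
--             'mtthm',
--             'didi',
--             'ctrip',
--             'qunar',
--             'tongcheng',
--             'fliggy',
--             'umetrip',
--             'htinns',
--             'abroad',
--             'leo',
--             'solar',
--             'etc',
--         )
--     ):
--         return 'travel'
--     if any(
--         k in b
--         for k in ('aweme', 'kuaishou', 'bili', 'videohm', 'qiyi', 'youku', 'yangshipin', 'cmvideohm', 'taobaolive')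
--     ):
--         return 'video'
--     if any(k in b for k in ('qqmusic', 'kugou', 'music', 'ximalaya', 'ting', 'fm', 'read', 'novel')):
--         return 'audio_reading'
--     if any(k in b for k in ('weibo', 'mqq', 'xhs', 'zhihu', 'wechat')):
--         return 'social'
--     if any(
--         k in b
--         for k in (
--             'dingtalk',
--             'feishu',
--             'meeting',
--             'wps',
--             'docs',
--             'netdisk',
--             'browser',
--             'quark',
--             'uc.',
--             'tianyancha',
--             'kimi',
--         )
--     ):
--         return 'productivity'
--     if any(k in b for k in ('news', 'article', 'dcar', 'autohome', 'yiche', 'hupu', 'zhibo8')):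
--         return 'news'
--     if any(k in b for k in ('meitu', 'beautycam', 'retouch', 'lemon', 'camera')):
--         return 'photo_video_edit'
--     if any(k in b for k in ('zuoyebang', 'kuaiduizuoye', 'baicizhan', 'youdao', 'ihuman', 'jiaxiao', 'babybus')):
--         return 'education'
--     return 'general'
-- ===== SOURCE B (Python) =====
-- CATEGORIES = [
--     ('ecommerce', ('taobao', 'tmall', 'jd.', 'pinduoduo', 'vip', 'dewu', 'idlefish',
--                    'zhuanzhuan', 'hippo', 'ddmc', 'samsclub', 'damai', 'cainiao')),
--     ('finance', ('alipay', 'bank', 'icbc', 'ccb', 'cmb', 'psbc', 'pingan')),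
--     ('life', ('meituan', 'dianping', 'eleme', 'wuba', 'beike', 'anjuke', 'luckin', 'kfc', 'charge')),
--     ('travel', ('amap', 'mtthm', 'didi', 'ctrip', 'qunar', 'tongcheng', 'fliggy',
--                 'umetrip', 'htinns', 'abroad', 'leo', 'solar', 'etc')),
--     ('video', ('aweme', 'kuaishou', 'bili', 'videohm', 'qiyi', 'youku', 'yangshipin',
--                'cmvideohm', 'taobaolive')),
--     ('audio_reading', ('qqmusic', 'kugou', 'music', 'ximalaya', 'ting', 'fm', 'read', 'novel')),
--     ('social', ('weibo', 'mqq', 'xhs', 'zhihu', 'wechat')),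
--     ('productivity', ('dingtalk', 'feishu', 'meeting', 'wps', 'docs', 'netdisk',
--                       'browser', 'quark', 'uc.', 'tianyancha', 'kimi')),
--     ('news', ('news', 'article', 'dcar', 'autohome', 'yiche', 'hupu', 'zhibo8')),
--     ('photo_video_edit', ('meitu', 'beautycam', 'retouch', 'lemon', 'camera')),
--     ('education', ('zuoyebang', 'kuaiduizuoye', 'baicizhan', 'youdao', 'ihuman', 'jiaxiao', 'babybus')),
-- ]
--
-- # flat keyword -> priority index table, in insertion order of the chain
-- _KEYWORDS = [(k, i) for i, (_, kws) in enumerate(CATEGORIES) for k in kws]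
--
--
-- def categorize_bundle(app_package: str) -> str:
--     # single flat pass: the answer is the category of minimal priority index
--     # among all matching keywords (no per-category early-return chain)
--     b = app_package.lower()
--     best = len(CATEGORIES)
--     for k, i in _KEYWORDS:
--         if i < best and k in b:
--             best = i
--     return CATEGORIES[best][0] if best < len(CATEGORIES) else 'general'
-- ===== Notes on version B (the rewrite author's own statement) =====
-- stated objective: alternative
-- what changed: Instead of an eleven-branch early-return chain testing one category group at a time, B makes a single flat pass over all (keyword, priority) pairs keeping an argmin accumulator of the best matching priority, then maps that minimal index back to its category name; correctness follows because the first matching category of the chain is exactly the one with minimal index.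
import Mathlib
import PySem

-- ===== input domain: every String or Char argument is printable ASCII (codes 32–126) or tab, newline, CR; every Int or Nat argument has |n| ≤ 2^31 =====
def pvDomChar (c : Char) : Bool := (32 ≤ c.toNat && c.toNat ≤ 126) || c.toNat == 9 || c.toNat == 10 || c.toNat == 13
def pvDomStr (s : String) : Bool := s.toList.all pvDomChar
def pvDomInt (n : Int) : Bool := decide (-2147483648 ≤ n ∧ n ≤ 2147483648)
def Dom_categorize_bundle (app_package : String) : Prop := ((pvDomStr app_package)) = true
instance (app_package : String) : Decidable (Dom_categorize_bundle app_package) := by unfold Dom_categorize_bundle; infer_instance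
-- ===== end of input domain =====

-- B replaces A's eleven-branch early-return chain with one flat argmin pass over all
-- (keyword, priority) pairs, then maps the minimal matching index back to its name;
-- objective: alternative (same values, same cost).

-- ===== PORT A =====
def categorize_bundle (app_package : String) : String :=
  let b := PySem.Str.lower app_package
  if ["taobao", "tmall", "jd.", "pinduoduo", "vip", "dewu", "idlefish", "zhuanzhuan",
      "hippo", "ddmc", "samsclub", "damai", "cainiao"].any (fun k => PySem.Str.isIn k b) then
    "ecommerce"
  else if ["alipay", "bank", "icbc", "ccb", "cmb", "psbc", "pingan"].any
      (fun k => PySem.Str.isIn k b) then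
    "finance"
  else if ["meituan", "dianping", "eleme", "wuba", "beike", "anjuke", "luckin", "kfc",
      "charge"].any (fun k => PySem.Str.isIn k b) then
    "life"
  else if ["amap", "mtthm", "didi", "ctrip", "qunar", "tongcheng", "fliggy", "umetrip",
      "htinns", "abroad", "leo", "solar", "etc"].any (fun k => PySem.Str.isIn k b) then
    "travel"
  else if ["aweme", "kuaishou", "bili", "videohm", "qiyi", "youku", "yangshipin",
      "cmvideohm", "taobaolive"].any (fun k => PySem.Str.isIn k b) then
    "video"
  else if ["qqmusic", "kugou", "music", "ximalaya", "ting", "fm", "read", "novel"].any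
      (fun k => PySem.Str.isIn k b) then
    "audio_reading"
  else if ["weibo", "mqq", "xhs", "zhihu", "wechat"].any (fun k => PySem.Str.isIn k b) then
    "social"
  else if ["dingtalk", "feishu", "meeting", "wps", "docs", "netdisk", "browser", "quark",
      "uc.", "tianyancha", "kimi"].any (fun k => PySem.Str.isIn k b) then
    "productivity"
  else if ["news", "article", "dcar", "autohome", "yiche", "hupu", "zhibo8"].any
      (fun k => PySem.Str.isIn k b) then
    "news"
  else if ["meitu", "beautycam", "retouch", "lemon", "camera"].any
      (fun k => PySem.Str.isIn k b) then
    "photo_video_edit"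
  else if ["zuoyebang", "kuaiduizuoye", "baicizhan", "youdao", "ihuman", "jiaxiao",
      "babybus"].any (fun k => PySem.Str.isIn k b) then
    "education"
  else
    "general"

-- ===== PORT B =====
-- the module-level CATEGORIES table of Source B
def pvCategories : List (String × List String) :=
  [("ecommerce", ["taobao", "tmall", "jd.", "pinduoduo", "vip", "dewu", "idlefish",
                  "zhuanzhuan", "hippo", "ddmc", "samsclub", "damai", "cainiao"]),
   ("finance", ["alipay", "bank", "icbc", "ccb", "cmb", "psbc", "pingan"]),
   ("life", ["meituan", "dianping", "eleme", "wuba", "beike", "anjuke", "luckin", "kfc",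
             "charge"]),
   ("travel", ["amap", "mtthm", "didi", "ctrip", "qunar", "tongcheng", "fliggy", "umetrip",
               "htinns", "abroad", "leo", "solar", "etc"]),
   ("video", ["aweme", "kuaishou", "bili", "videohm", "qiyi", "youku", "yangshipin",
              "cmvideohm", "taobaolive"]),
   ("audio_reading", ["qqmusic", "kugou", "music", "ximalaya", "ting", "fm", "read",
                      "novel"]),
   ("social", ["weibo", "mqq", "xhs", "zhihu", "wechat"]),
   ("productivity", ["dingtalk", "feishu", "meeting", "wps", "docs", "netdisk", "browser",
                     "quark", "uc.", "tianyancha", "kimi"]),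
   ("news", ["news", "article", "dcar", "autohome", "yiche", "hupu", "zhibo8"]),
   ("photo_video_edit", ["meitu", "beautycam", "retouch", "lemon", "camera"]),
   ("education", ["zuoyebang", "kuaiduizuoye", "baicizhan", "youdao", "ihuman", "jiaxiao",
                  "babybus"])]

-- Source B's _KEYWORDS: flat (keyword, priority index) comprehension over enumerate(CATEGORIES)
def pvKeywords : List (String × Int) :=
  (PySem.List.enumerate pvCategories).flatMap (fun p => p.2.2.map (fun k => (k, p.1)))

-- the body of Source B's loop: keep the smaller matching priority index
def pvStep (b : String) (best : Int) (p : String × Int) : Int :=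
  if p.2 < best ∧ PySem.Str.isIn p.1 b then p.2 else best

def categorize_bundle_alt (app_package : String) : String :=
  let b := PySem.Str.lower app_package
  let best := pvKeywords.foldl (pvStep b) (pvCategories.length : Int)
  -- CATEGORIES[best][0]: the guard best < len makes the Python indexing total;
  -- pyGet? returns some exactly there, so the getD default is never taken
  if best < (pvCategories.length : Int) then
    ((PySem.List.pyGet? pvCategories best).map Prod.fst).getD "general"
  else "general"

-- ===== PRECONDITION & SPEC =====
def Spec_categorize_bundle (app_package : String) (out : String) : Prop := out = categorize_bundle_alt app_package
instance (app_package : String) (out : String) : Decidable (Spec_categorize_bundle app_package out) := by unfold Spec_categorize_bundle; infer_instance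

-- ===== CLAIM (what is proved, stated in full; the proofs are below) =====
def Claim_equal_categorize_bundle : Prop := ∀ (app_package : String), Dom_categorize_bundle app_package → Spec_categorize_bundle app_package (categorize_bundle app_package)

-- ===== LEMMAS AND PROOFS =====

-- proof-only helpers: pvFlat = the flat table built group by group; pvFirst = the
-- first matching category (with its priority index); pvScanStr = first-match name

def pvFlat (n : Nat) : List (String × List String) → List (String × Int)
  | [] => []
  | (_, kws) :: rest => kws.map (fun k => (k, (n : Int))) ++ pvFlat (n + 1) rest

def pvFirst (b : String) (n : Nat) : List (String × List String) → Option (Nat × String)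
  | [] => none
  | (name, kws) :: rest =>
      if kws.any (fun k => PySem.Str.isIn k b) then some (n, name) else pvFirst b (n + 1) rest

def pvScanStr (b : String) : List (String × List String) → String
  | [] => "general"
  | (name, kws) :: rest =>
      if kws.any (fun k => PySem.Str.isIn k b) then name else pvScanStr b rest

theorem pvFlat_eq (cats : List (String × List String)) :
    ∀ n : Nat, (PySem.List.enumerate cats (n : Int)).flatMap
        (fun p => p.2.2.map (fun k => (k, p.1))) = pvFlat n cats := by
  induction cats with
  | nil => intro n; simp [pvFlat, PySem.List.enumerate_nil]
  | cons c rest ih =>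
      intro n
      obtain ⟨name, kws⟩ := c
      have h1 : ((n : Int) + 1) = ((n + 1 : Nat) : Int) := by push_cast; ring
      simp only [PySem.List.enumerate_cons, List.flatMap_cons, pvFlat, h1, ih (n + 1)]

-- a same-index group folds to "i if it improves best and some keyword matches"
theorem pvStep_group (b : String) (kws : List String) (i : Int) :
    ∀ best : Int, (kws.map (fun k => (k, i))).foldl (pvStep b) best =
      if i < best ∧ kws.any (fun k => PySem.Str.isIn k b) then i else best := by
  induction kws with
  | nil => intro best; simp
  | cons k ks ih =>
      intro best
      simp only [List.map_cons, List.foldl_cons, List.any_cons]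
      rw [ih]
      unfold pvStep
      by_cases hlt : i < best
      · by_cases hk : PySem.Chars.isIn k.toList b.toList = true
        · simp [hlt, hk]
        · simp [hlt, hk]
      · simp [hlt]

theorem pvFirst_ge (b : String) (cats : List (String × List String)) :
    ∀ n i nm, pvFirst b n cats = some (i, nm) → n ≤ i := by
  induction cats with
  | nil => intro n i nm h; simp [pvFirst] at h
  | cons c rest ih =>
      intro n i nm h
      obtain ⟨name, kws⟩ := c
      by_cases hc : kws.any (fun k => PySem.Str.isIn k b) = true
      · rw [show pvFirst b n ((name, kws) :: rest) = some (n, name) from by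
          unfold pvFirst; rw [if_pos hc]] at h
        simp only [Option.some.injEq, Prod.mk.injEq] at h
        omega
      · rw [show pvFirst b n ((name, kws) :: rest) = pvFirst b (n + 1) rest from by
          simp only [pvFirst]; rw [if_neg hc]] at h
        have := ih (n + 1) i nm h; omega

theorem pvFirst_lt (b : String) (cats : List (String × List String)) :
    ∀ n i nm, pvFirst b n cats = some (i, nm) → i < n + cats.length := by
  induction cats with
  | nil => intro n i nm h; simp [pvFirst] at h
  | cons c rest ih =>
      intro n i nm h
      obtain ⟨name, kws⟩ := c
      by_cases hc : kws.any (fun k => PySem.Str.isIn k b) = true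
      · rw [show pvFirst b n ((name, kws) :: rest) = some (n, name) from by
          unfold pvFirst; rw [if_pos hc]] at h
        simp only [Option.some.injEq, Prod.mk.injEq] at h
        simp; omega
      · rw [show pvFirst b n ((name, kws) :: rest) = pvFirst b (n + 1) rest from by
          simp only [pvFirst]; rw [if_neg hc]] at h
        have := ih (n + 1) i nm h; simp; omega

theorem pvFirst_name (b : String) (cats : List (String × List String)) :
    ∀ n i nm, pvFirst b n cats = some (i, nm) →
      (cats[i - n]?).map Prod.fst = some nm := by
  induction cats with
  | nil => intro n i nm h; simp [pvFirst] at h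
  | cons c rest ih =>
      intro n i nm h
      obtain ⟨name, kws⟩ := c
      by_cases hc : kws.any (fun k => PySem.Str.isIn k b) = true
      · rw [show pvFirst b n ((name, kws) :: rest) = some (n, name) from by
          unfold pvFirst; rw [if_pos hc]] at h
        simp only [Option.some.injEq, Prod.mk.injEq] at h
        obtain ⟨h1, h2⟩ := h
        subst h1; subst h2; simp
      · rw [show pvFirst b n ((name, kws) :: rest) = pvFirst b (n + 1) rest from by
          simp only [pvFirst]; rw [if_neg hc]] at h
        have hge := pvFirst_ge b rest (n + 1) i nm h
        have := ih (n + 1) i nm h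
        have hs : i - n = (i - (n + 1)) + 1 := by omega
        rw [hs, List.getElem?_cons_succ]
        exact this

-- the argmin fold over the flat table computes the first matching index
theorem pvFold_flat (b : String) (cats : List (String × List String)) :
    ∀ (n : Nat) (best : Int), (pvFlat n cats).foldl (pvStep b) best =
      match pvFirst b n cats with
      | some (i, _) => if (i : Int) < best then (i : Int) else best
      | none => best := by
  induction cats with
  | nil => intro n best; simp [pvFlat, pvFirst]
  | cons c rest ih =>
      intro n best
      obtain ⟨name, kws⟩ := c
      by_cases hc : kws.any (fun k => PySem.Str.isIn k b) = true
      · rw [show pvFirst b n ((name, kws) :: rest) = some (n, name) from by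
          unfold pvFirst; rw [if_pos hc]]
        simp only [pvFlat]
        rw [List.foldl_append, pvStep_group]
        by_cases hlt : (n : Int) < best
        · rw [if_pos ⟨hlt, hc⟩, if_pos hlt, ih (n + 1) ((n : Nat) : Int)]
          cases hfr : pvFirst b (n + 1) rest with
          | none => simp
          | some p =>
              obtain ⟨i, nm⟩ := p
              have hge := pvFirst_ge b rest (n + 1) i nm hfr
              have hni : ¬ ((i : Int) < (n : Int)) := by omega
              simp [hni]
        · rw [if_neg (fun hand => hlt hand.1), if_neg hlt, ih (n + 1) best]
          cases hfr : pvFirst b (n + 1) rest with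
          | none => simp
          | some p =>
              obtain ⟨i, nm⟩ := p
              have hge := pvFirst_ge b rest (n + 1) i nm hfr
              have hni : ¬ ((i : Int) < best) := by
                push_cast at *; omega
              simp [hni]
      · rw [show pvFirst b n ((name, kws) :: rest) = pvFirst b (n + 1) rest from by
          simp only [pvFirst]; rw [if_neg hc]]
        simp only [pvFlat]
        rw [List.foldl_append, pvStep_group, if_neg (fun hand => hc hand.2)]
        exact ih (n + 1) best

-- pvScanStr returns the name of the first matching category
theorem pvScanStr_first (b : String) (cats : List (String × List String)) :
    ∀ n : Nat, pvScanStr b cats =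
      match pvFirst b n cats with
      | some (_, nm) => nm
      | none => "general" := by
  induction cats with
  | nil => intro n; simp [pvScanStr, pvFirst]
  | cons c rest ih =>
      intro n
      obtain ⟨name, kws⟩ := c
      by_cases hc : kws.any (fun k => PySem.Str.isIn k b) = true
      · rw [show pvFirst b n ((name, kws) :: rest) = some (n, name) from by
          unfold pvFirst; rw [if_pos hc]]
        unfold pvScanStr; rw [if_pos hc]
      · rw [show pvFirst b n ((name, kws) :: rest) = pvFirst b (n + 1) rest from by
          simp only [pvFirst]; rw [if_neg hc]]
        unfold pvScanStr; rw [if_neg hc]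
        exact ih (n + 1)

-- B's whole body, for any category table, equals the first-match scan
theorem pvAlt_eq_scan (b : String) (cats : List (String × List String)) :
    (if (pvFlat 0 cats).foldl (pvStep b) (cats.length : Int) < (cats.length : Int) then
      ((PySem.List.pyGet? cats ((pvFlat 0 cats).foldl (pvStep b) (cats.length : Int))).map
        Prod.fst).getD "general"
    else "general") = pvScanStr b cats := by
  rw [pvFold_flat b cats 0 (cats.length : Int), pvScanStr_first b cats 0]
  cases hfr : pvFirst b 0 cats with
  | none => simp
  | some p =>
      obtain ⟨i, nm⟩ := p
      have hlt : i < cats.length := by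
        have := pvFirst_lt b cats 0 i nm hfr; omega
      have hlt' : (i : Int) < (cats.length : Int) := by exact_mod_cast hlt
      have hname : (cats[i]?).map Prod.fst = some nm := by
        have := pvFirst_name b cats 0 i nm hfr
        simpa using this
      simp only [hlt', if_pos, PySem.List.pyGet?_natCast, hname, Option.getD_some]

-- ===== VERDICT (by name: the statement is the Claim_ definition above) =====
theorem categorize_bundle_spec : Claim_equal_categorize_bundle := by
  intro s _
  unfold Spec_categorize_bundle categorize_bundle categorize_bundle_alt
  have hkw : pvKeywords = pvFlat 0 pvCategories := by
    have := pvFlat_eq pvCategories 0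
    simpa [pvKeywords] using this
  rw [hkw, pvAlt_eq_scan (PySem.Str.lower s) pvCategories]
  simp only [pvScanStr, pvCategories]
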